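-- pv_equiv track=rewrite | github.com/saraswatmks/leetcode-day-practice | Arrays_and_Strings/minSwapsBalanceString.py | minSwapwithStack
-- ===== SOURCE A (Python) =====
-- def minSwapwithStack(s: str):
--     """
--     Time Complexity: O(n)
--     Space Complexity: O(n)
--     """
--     stack = []
--     mismatch = 0
--     for ch in s:
--         if ch == "[":
--             stack.append(ch)
--         else:
--             if stack:
--                 stack.pop()
--             else:
--                 mismatch += 1
--     return (mismatch + 1) // 2
-- ===== SOURCE B (Python) =====
-- def minSwapwithStack(s: str):
--     """Running prefix balance + its minimum instead of a stack."""
--     balance = 0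
--     min_bal = 0
--     for ch in s:
--         balance += 1 if ch == "[" else -1
--         if balance < min_bal:
--             min_bal = balance
--     return (-min_bal + 1) // 2
-- ===== Notes on version B (the rewrite author's own statement) =====
-- stated objective: simpler
-- what changed: Replaces the O(n)-space stack with a single running prefix balance and its running minimum; unmatched closers equal -min_bal, so the result is (-min_bal+1)//2.
import Mathlib
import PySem

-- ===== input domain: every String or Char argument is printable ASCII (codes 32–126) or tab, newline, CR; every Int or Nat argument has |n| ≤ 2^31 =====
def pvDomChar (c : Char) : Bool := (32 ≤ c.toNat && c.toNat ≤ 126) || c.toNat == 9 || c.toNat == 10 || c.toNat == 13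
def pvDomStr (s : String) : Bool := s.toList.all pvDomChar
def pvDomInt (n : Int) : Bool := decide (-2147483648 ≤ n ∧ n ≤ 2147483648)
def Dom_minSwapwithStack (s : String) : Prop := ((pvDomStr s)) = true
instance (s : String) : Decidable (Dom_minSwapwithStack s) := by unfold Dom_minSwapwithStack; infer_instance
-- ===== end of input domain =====

-- B replaces A's explicit stack by a running prefix balance and its minimum (O(1) space).

-- ===== PORT A =====
-- stack push/pop only ever holds '[' characters; cons-push is used (only the length matters,
-- and the popped value is discarded, so this is step-for-step A's loop).
def pvStepA (acc : List Char × Int) (ch : Char) : List Char × Int :=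
  if ch = '[' then (ch :: acc.1, acc.2)
  else
    match acc.1 with
    | _ :: t => (t, acc.2)
    | [] => ([], acc.2 + 1)

def minSwapwithStack (s : String) : Int :=
  let st := s.toList.foldl pvStepA ([], 0)
  PySem.Int.floordiv (st.2 + 1) 2

-- ===== PORT B =====
def pvStepB (acc : Int × Int) (ch : Char) : Int × Int :=
  let bal := acc.1 + (if ch = '[' then 1 else -1)
  (bal, if bal < acc.2 then bal else acc.2)

def minSwapwithStack_alt (s : String) : Int :=
  let st := s.toList.foldl pvStepB (0, 0)
  PySem.Int.floordiv (-st.2 + 1) 2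

-- ===== PRECONDITION & SPEC =====
def Spec_minSwapwithStack (s : String) (out : Int) : Prop := out = minSwapwithStack_alt s
instance (s : String) (out : Int) : Decidable (Spec_minSwapwithStack s out) := by unfold Spec_minSwapwithStack; infer_instance

-- ===== CLAIM (what is proved, stated in full; the proofs are below) =====
def Claim_equal_minSwapwithStack : Prop := ∀ (s : String), Dom_minSwapwithStack s → Spec_minSwapwithStack s (minSwapwithStack s)

-- ===== LEMMAS AND PROOFS =====

-- Invariant linking A's (stack, mismatch) with B's (balance, min_bal):
-- mismatch = -min_bal and stack.length = balance - min_bal.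
theorem pv_fold_inv (l : List Char) :
    ∀ (stack : List Char) (mm bal mb : Int),
      mm = -mb → (stack.length : Int) = bal - mb →
      (l.foldl pvStepA (stack, mm)).2 = -(l.foldl pvStepB (bal, mb)).2 := by
  induction l with
  | nil => intro stack mm bal mb h1 h2; simpa using h1
  | cons c t ih =>
    intro stack mm bal mb h1 h2
    simp only [List.foldl_cons]
    by_cases hc : c = '['
    · subst hc
      simp only [pvStepA, pvStepB, reduceIte]
      have hge : ¬ bal + 1 < mb := by omega
      rw [if_neg hge]
      exact ih _ _ _ _ h1 (by simp; omega)
    · simp only [pvStepA, pvStepB, if_neg hc]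
      cases stack with
      | nil =>
        have hb : bal = mb := by simp at h2; omega
        have hlt : bal + -1 < mb := by omega
        rw [if_pos hlt]
        exact ih _ _ _ _ (by omega) (by simp)
      | cons x xs =>
        have hgt : (xs.length : Int) + 1 = bal - mb := by simpa using h2
        have hge : ¬ bal + -1 < mb := by omega
        rw [if_neg hge]
        exact ih _ _ _ _ h1 (by omega)

-- ===== VERDICT (by name: the statement is the Claim_ definition above) =====
theorem minSwapwithStack_spec : Claim_equal_minSwapwithStack := by
  intro s _
  show _ = _
  unfold minSwapwithStack minSwapwithStack_alt
  have h := pv_fold_inv s.toList [] 0 0 0 (by simp) (by simp)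
  simp only []
  rw [h]
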